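-- pv_equiv track=rewrite | github.com/yannickloth/W33-Theory | tools/witting_phase_law_invariance.py | check_symplectic
-- ===== SOURCE A (Python) =====
-- def check_symplectic(M):
--     Omega = [[0, 0, 1, 0], [0, 0, 0, 1], [2, 0, 0, 0], [0, 2, 0, 0]]
--
--     def mat_mult(A, B):
--         n, k, m = len(A), len(B), len(B[0])
--         res = [[0] * m for _ in range(n)]
--         for i in range(n):
--             for j in range(m):
--                 for l in range(k):
--                     res[i][j] = (res[i][j] + A[i][l] * B[l][j]) % 3
--         return res
--
--     MT = [[M[j][i] for j in range(4)] for i in range(4)]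
--     return mat_mult(mat_mult(MT, Omega), M) == Omega
-- ===== SOURCE B (Python) =====
-- def check_symplectic(M):
--     Omega = [[0, 0, 1, 0], [0, 0, 0, 1], [2, 0, 0, 0], [0, 2, 0, 0]]
--
--     def pairing(u, v):
--         return (u[0] * v[2] + u[1] * v[3] + 2 * u[2] * v[0] + 2 * u[3] * v[1]) % 3
--
--     cols = [[M[r][i] for r in range(4)] for i in range(4)]
--     return [[pairing(cols[i], cols[j]) for j in range(4)] for i in range(4)] == Omega
-- ===== Notes on version B (the rewrite author's own statement) =====
-- stated objective: simpler
-- what changed: Replaces the explicit transpose and two generic cubic matrix multiplications by directly evaluating the symplectic pairing of each pair of columns of M (the quadratic form M^T*Omega*M entrywise), building the 4x4 table in one comprehension. Pre_ admits only 4x4 matrices: on other shapes A raises IndexError, except ragged 4-row matrices whose rows are longer than 4, where A's False is an accidental shape-mismatch comparison that B does not reproduce.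
import Mathlib
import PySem

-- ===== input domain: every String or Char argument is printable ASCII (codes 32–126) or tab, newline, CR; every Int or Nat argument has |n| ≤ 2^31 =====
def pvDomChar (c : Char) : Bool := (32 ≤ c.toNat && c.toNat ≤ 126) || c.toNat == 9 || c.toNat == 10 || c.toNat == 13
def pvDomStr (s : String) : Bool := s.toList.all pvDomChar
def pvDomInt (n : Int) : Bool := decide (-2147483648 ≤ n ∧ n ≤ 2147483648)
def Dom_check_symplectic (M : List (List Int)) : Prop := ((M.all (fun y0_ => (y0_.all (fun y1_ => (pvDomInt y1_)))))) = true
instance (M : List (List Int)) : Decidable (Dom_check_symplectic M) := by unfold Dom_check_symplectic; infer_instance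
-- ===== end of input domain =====

-- B evaluates MᵀΩM entrywise as the symplectic pairing of pairs of columns of M,
-- removing the explicit transpose and both generic matrix multiplications (objective: simpler).

-- ===== PORT A =====
-- xs[i][j] on a 2-D list (all indices produced by range, hence in range under Pre_)
def pvGet2 (R : List (List Int)) (i j : Int) : Int :=
  PySem.List.pyGetD (PySem.List.pyGetD R i []) j 0

-- def mat_mult(A, B): the i/j loops build rows/entries of res; the l-loop, which only ever
-- reads and writes the single cell res[i][j], is the fold over that cell's accumulator
-- (starting from the 0 that [0]*m put there) — exact, as no other cell is touched.
def pvMatMult (A B : List (List Int)) : List (List Int) :=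
  let n : Int := A.length
  let k : Int := B.length
  let m : Int := (PySem.List.pyGetD B 0 []).length
  (PySem.List.pyRange 0 n 1).map (fun i =>
    (PySem.List.pyRange 0 m 1).map (fun j =>
      (PySem.List.pyRange 0 k 1).foldl (fun acc l =>
        PySem.Int.mod (acc + pvGet2 A i l * pvGet2 B l j) 3) 0))

def pvOmega : List (List Int) := [[0, 0, 1, 0], [0, 0, 0, 1], [2, 0, 0, 0], [0, 2, 0, 0]]

def check_symplectic (M : List (List Int)) : Bool :=
  let MT : List (List Int) :=
    (PySem.List.pyRange 0 4 1).map (fun i =>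
      (PySem.List.pyRange 0 4 1).map (fun j => pvGet2 M j i))
  pvMatMult (pvMatMult MT pvOmega) M == pvOmega

-- ===== PORT B =====
def pvPairing (u v : List Int) : Int :=
  PySem.Int.mod
    (PySem.List.pyGetD u 0 0 * PySem.List.pyGetD v 2 0
      + PySem.List.pyGetD u 1 0 * PySem.List.pyGetD v 3 0
      + 2 * PySem.List.pyGetD u 2 0 * PySem.List.pyGetD v 0 0
      + 2 * PySem.List.pyGetD u 3 0 * PySem.List.pyGetD v 1 0) 3

def check_symplectic_alt (M : List (List Int)) : Bool :=
  let cols : List (List Int) :=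
    (PySem.List.pyRange 0 4 1).map (fun i =>
      (PySem.List.pyRange 0 4 1).map (fun r => pvGet2 M r i))
  ((PySem.List.pyRange 0 4 1).map (fun i =>
    (PySem.List.pyRange 0 4 1).map (fun j =>
      pvPairing (PySem.List.pyGetD cols i []) (PySem.List.pyGetD cols j []))))
    == pvOmega



-- ===== PRECONDITION & SPEC =====
-- Pre_ excludes non-4×4 matrices: A raises IndexError on all of them except ragged 4-row
-- matrices whose rows are longer than 4, where A's False is an accidental artefact of
-- comparing a mis-shaped 4×m product with the 4×4 Omega; B reads only the first 4 columns there.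
def Pre_check_symplectic (M : List (List Int)) : Prop :=
  M.length = 4 ∧ ∀ r ∈ M, r.length = 4
instance (M : List (List Int)) : Decidable (Pre_check_symplectic M) := by
  unfold Pre_check_symplectic; infer_instance

def pvWitness_check_symplectic : List (List Int) :=
  [[1, 0, 0, 0], [0, 1, 0, 0], [0, 0, 1, 0], [0, 0, 0, 1]]

def Spec_check_symplectic (M : List (List Int)) (out : Bool) : Prop := out = check_symplectic_alt M
instance (M : List (List Int)) (out : Bool) : Decidable (Spec_check_symplectic M out) := by unfold Spec_check_symplectic; infer_instance

-- ===== CLAIM (what is proved, stated in full; the proofs are below) =====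
def Claim_equal_check_symplectic : Prop := ∀ (M : List (List Int)), Dom_check_symplectic M → Pre_check_symplectic M → Spec_check_symplectic M (check_symplectic M)

-- ===== LEMMAS AND PROOFS =====
lemma pvShape {T : Type} (xs : List T) (h : xs.length = 4) :
    ∃ a b c d, xs = [a, b, c, d] := by
  rcases xs with _ | ⟨a, _ | ⟨b, _ | ⟨c, _ | ⟨d, _ | ⟨e, t⟩⟩⟩⟩⟩ <;> simp at h
  exact ⟨a, b, c, d, rfl⟩
lemma pvMod3 (x : Int) : PySem.Int.mod x 3 = x % 3 := PySem.Int.mod_eq_emod_of_pos (by norm_num)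

lemma pvCast3 (x y : Int) (h : (x : ZMod 3) = (y : ZMod 3)) : x % 3 = y % 3 :=
  (ZMod.intCast_eq_intCast_iff' ..).mp h

lemma pvCastMod3 (x : Int) : (((x % 3 : Int)) : ZMod 3) = (x : ZMod 3) := by
  have h := ZMod.intCast_mod x 3
  norm_num at h
  exact h

lemma pvG0 {T : Type} (x0 x1 x2 x3 : T) (d : T) : PySem.List.pyGetD [x0, x1, x2, x3] 0 d = x0 := by
  simp [PySem.List.pyGetD, PySem.List.pyGet?, PySem.List.pyIdx?]
lemma pvG1 {T : Type} (x0 x1 x2 x3 : T) (d : T) : PySem.List.pyGetD [x0, x1, x2, x3] 1 d = x1 := by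
  simp [PySem.List.pyGetD, PySem.List.pyGet?, PySem.List.pyIdx?]
lemma pvG2 {T : Type} (x0 x1 x2 x3 : T) (d : T) : PySem.List.pyGetD [x0, x1, x2, x3] 2 d = x2 := by
  simp [PySem.List.pyGetD, PySem.List.pyGet?, PySem.List.pyIdx?]
lemma pvG3 {T : Type} (x0 x1 x2 x3 : T) (d : T) : PySem.List.pyGetD [x0, x1, x2, x3] 3 d = x3 := by
  simp [PySem.List.pyGetD, PySem.List.pyGet?, PySem.List.pyIdx?]

set_option maxHeartbeats 1000000 in
lemma pvKey (m00 m01 m02 m03 m10 m11 m12 m13 m20 m21 m22 m23 m30 m31 m32 m33 : Int) :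
    check_symplectic [[m00,m01,m02,m03],[m10,m11,m12,m13],[m20,m21,m22,m23],[m30,m31,m32,m33]]
      = check_symplectic_alt [[m00,m01,m02,m03],[m10,m11,m12,m13],[m20,m21,m22,m23],[m30,m31,m32,m33]] := by
  unfold check_symplectic check_symplectic_alt
  refine congrArg (· == pvOmega) ?_
  have hR : PySem.List.pyRange 0 4 1 = [0, 1, 2, 3] := by
    simp [PySem.List.pyRange_one_cons, PySem.List.pyRange_one_eq_nil]
  norm_num only [hR, pvMatMult, pvGet2, pvPairing, pvOmega, pvG0, pvG1, pvG2, pvG3, pvMod3,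
    List.map_cons, List.map_nil, List.foldl_cons, List.foldl_nil,
    List.length_cons, List.length_nil, List.length_map]
  norm_num only [List.cons.injEq]
  repeat' apply And.intro
  all_goals first
  | trivial
  | (apply pvCast3
     push_cast [pvCastMod3]
     ring)

-- ===== VERDICT (by name: the statement is the Claim_ definition above) =====
theorem check_symplectic_spec : Claim_equal_check_symplectic := by
  intro M _hD hP
  obtain ⟨hlen, hrow⟩ := hP
  obtain ⟨r0, r1, r2, r3, rfl⟩ := pvShape M hlen
  obtain ⟨m00, m01, m02, m03, rfl⟩ := pvShape r0 (hrow _ (by simp))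
  obtain ⟨m10, m11, m12, m13, rfl⟩ := pvShape r1 (hrow _ (by simp))
  obtain ⟨m20, m21, m22, m23, rfl⟩ := pvShape r2 (hrow _ (by simp))
  obtain ⟨m30, m31, m32, m33, rfl⟩ := pvShape r3 (hrow _ (by simp))
  unfold Spec_check_symplectic
  apply pvKey
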